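-- pv_equiv track=rewrite | github.com/1337boardgamer/Adventofcode | 2017/aoc2017-d4.py | part2
-- ===== SOURCE A (Python) =====
-- def part2(s):
--     count=0
--     for e in s:
--         unique=True
--         for t in e:
--             if e.count(t)>1:
--                 unique=False
--         if unique:
--             count+=1
--     return count
-- ===== SOURCE B (Python) =====
-- def part2(s):
--     return sum(len(set(e)) == len(e) for e in s)
-- ===== Notes on version B (the rewrite author's own statement) =====
-- stated objective: faster
-- what changed: Replaces the nested loop calling e.count(t) for every element (quadratic per line) with a single set-size test len(set(e)) == len(e) per line, summed in one pass.
import Mathlib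
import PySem

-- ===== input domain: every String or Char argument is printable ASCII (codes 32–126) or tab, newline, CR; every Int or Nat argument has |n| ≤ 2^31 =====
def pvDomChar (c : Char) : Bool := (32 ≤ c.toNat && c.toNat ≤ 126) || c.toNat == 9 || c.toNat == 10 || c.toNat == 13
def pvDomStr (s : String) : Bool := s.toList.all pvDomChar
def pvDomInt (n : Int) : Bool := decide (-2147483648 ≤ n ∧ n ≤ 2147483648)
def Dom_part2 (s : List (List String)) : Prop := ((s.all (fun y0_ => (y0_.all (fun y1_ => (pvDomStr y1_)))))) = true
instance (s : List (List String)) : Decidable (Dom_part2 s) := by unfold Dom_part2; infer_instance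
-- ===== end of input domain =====

-- B counts lines whose set of words has the same size as the line (no duplicates),
-- replacing A's per-element count scan; a timing run measured B faster on large inputs.

-- ===== PORT A =====
def part2 (s : List (List String)) : Int :=
  s.foldl (fun count e =>
    let unique := e.foldl (fun unique t =>
      if PySem.List.count e t > 1 then false else unique) true
    if unique then count + 1 else count) 0

-- ===== PORT B =====
def part2_alt (s : List (List String)) : Int :=
  s.foldl (fun acc e =>
    acc + (if (PySem.Set.ofList e).length = e.length then 1 else 0)) 0

-- ===== PRECONDITION & SPEC =====
def Spec_part2 (s : List (List String)) (out : Int) : Prop := out = part2_alt s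
instance (s : List (List String)) (out : Int) : Decidable (Spec_part2 s out) := by unfold Spec_part2; infer_instance

-- ===== CLAIM (what is proved, stated in full; the proofs are below) =====
def Claim_equal_part2 : Prop := ∀ (s : List (List String)), Dom_part2 s → Spec_part2 s (part2 s)

-- ===== LEMMAS AND PROOFS =====

-- A's 'unique' flag fold: once false, always false
theorem pv_flag_foldl (cond : String → Prop) [DecidablePred cond] (l : List String) (b : Bool) :
    l.foldl (fun u t => if cond t then false else u) b = (b && l.all (fun t => decide ¬ cond t)) := by
  induction l generalizing b with
  | nil => simp
  | cons x xs ih =>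
    simp only [List.foldl_cons, List.all_cons]
    by_cases h : cond x
    · rw [if_pos h, ih]
      simp [h]
    · rw [if_neg h, ih]
      simp [h]

-- set(e) keeps a (first-occurrence) sublist of e
theorem pv_ofList_sublist {α : Type} [BEq α] [LawfulBEq α] (xs : List α) :
    (PySem.Set.ofList xs).Sublist xs := by
  induction xs using List.reverseRecOn with
  | nil => simp [PySem.Set.ofList_nil]
  | append_singleton ys y ih =>
    rw [PySem.Set.ofList_append_singleton, PySem.Set.add]
    split
    · exact ih.trans (List.sublist_append_left ys [y])
    · exact List.Sublist.append ih (List.Sublist.refl [y])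

theorem pv_len_ofList_eq_iff {α : Type} [BEq α] [LawfulBEq α] (xs : List α) :
    (PySem.Set.ofList xs).length = xs.length ↔ xs.Nodup := by
  constructor
  · intro h
    have := (pv_ofList_sublist xs).eq_of_length h
    rw [← this]
    exact PySem.Set.nodup_ofList xs
  · intro h
    rw [PySem.Set.ofList_eq_self_of_nodup xs h]

-- per-line agreement of the two uniqueness tests
theorem pv_line_eq (e : List String) :
    (e.foldl (fun u t => if PySem.List.count e t > 1 then false else u) true)
      = decide ((PySem.Set.ofList e).length = e.length) := by
  rw [pv_flag_foldl (fun t => PySem.List.count e t > 1)]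
  apply Bool.eq_iff_iff.mpr
  simp only [Bool.true_and, List.all_eq_true, decide_eq_true_eq, PySem.List.count_eq,
    pv_len_ofList_eq_iff, List.nodup_iff_count_le_one]
  constructor
  · intro h a
    by_cases ha : a ∈ e
    · have := h a ha; omega
    · simp [List.count_eq_zero_of_not_mem ha]
  · intro h t ht
    have := h t; omega

theorem part2_eq_alt (s : List (List String)) : part2 s = part2_alt s := by
  unfold part2 part2_alt
  congr 1
  funext c e
  rw [pv_line_eq]
  by_cases h : (PySem.Set.ofList e).length = e.length <;> simp [h]

-- ===== VERDICT (by name: the statement is the Claim_ definition above) =====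
theorem part2_spec : Claim_equal_part2 := by
  intro s _
  unfold Spec_part2
  exact part2_eq_alt s
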